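-- pv_equiv track=rewrite | github.com/Gendo90/HackerRank | Implementation/birthdayChocolate.py | birthday
-- ===== SOURCE A (Python) =====
-- def birthday(s, d, m):
--     #case where there are not enough squares to match the
--     #birth month requirement
--     if(m>len(s)):
--         return 0
--
--     sols = 0
--     for i in range(0, len(s)-m+1):
--         if(sum(s[i:i+m])==d):
--             sols+=1
--
--     return sols
-- ===== SOURCE B (Python) =====
-- def birthday(s, d, m):
--     n = len(s)
--     if m > n:
--         return 0
--     w = sum(s[:m])
--     count = 1 if w == d else 0
--     for i in range(m, n):
--         w += s[i] - s[i - m]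
--         if w == d:
--             count += 1
--     return count
-- ===== Notes on version B (the rewrite author's own statement) =====
-- stated objective: faster
-- what changed: Replaces per-window re-summation of each length-m slice with a single sliding-window pass that updates one running sum incrementally.
-- outside the precondition, e.g. on birthday([1, 2], 0, -1): A returns 3, B raises IndexError
import Mathlib
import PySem

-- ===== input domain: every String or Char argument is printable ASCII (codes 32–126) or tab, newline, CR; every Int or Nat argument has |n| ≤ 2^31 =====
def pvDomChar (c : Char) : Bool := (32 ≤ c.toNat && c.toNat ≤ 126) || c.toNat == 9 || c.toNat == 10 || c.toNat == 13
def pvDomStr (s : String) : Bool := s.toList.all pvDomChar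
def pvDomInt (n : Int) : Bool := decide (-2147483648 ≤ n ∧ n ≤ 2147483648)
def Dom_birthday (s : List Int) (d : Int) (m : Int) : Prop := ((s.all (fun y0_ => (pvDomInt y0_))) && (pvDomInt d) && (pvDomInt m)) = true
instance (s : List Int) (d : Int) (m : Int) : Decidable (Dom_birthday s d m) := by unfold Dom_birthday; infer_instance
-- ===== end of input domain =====

-- B replaces A's per-window re-summation (O(n*m)) by one sliding-window pass with an
-- incrementally updated running sum (O(n)); equal return values for all m ≥ 0.

-- ===== PORT A =====
def birthday (s : List Int) (d : Int) (m : Int) : Int :=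
  if m > PySem.List.len s then 0
  else
    (PySem.List.pyRange 0 (PySem.List.len s - m + 1) 1).foldl
      (fun sols i =>
        if (PySem.List.slice s (some i) (some (i + m))).sum = d then sols + 1 else sols) 0

-- ===== PORT B =====
-- loop body of B's sliding-window pass; s[i] and s[i-m] are in range for every visited i
-- when 0 ≤ m (Pre_), so pyGetD with default 0 is exact there
def bStep (s : List Int) (d m : Int) (p : Int × Int) (i : Int) : Int × Int :=
  let w := p.1 + PySem.List.pyGetD s i 0 - PySem.List.pyGetD s (i - m) 0
  (w, if w = d then p.2 + 1 else p.2)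

def birthday_alt (s : List Int) (d : Int) (m : Int) : Int :=
  if m > PySem.List.len s then 0
  else
    let w0 := (PySem.List.slice s none (some m)).sum
    let c0 : Int := if w0 = d then 1 else 0
    ((PySem.List.pyRange m (PySem.List.len s) 1).foldl (bStep s d m) (w0, c0)).2

-- ===== PRECONDITION & SPEC =====
-- Pre_ excludes negative m, outside the task's natural domain (a month length), where
-- A's count of empty slices is an implementation artefact and B's own indexing raises.
def Pre_birthday (s : List Int) (d : Int) (m : Int) : Prop := 0 ≤ m
instance (s : List Int) (d : Int) (m : Int) : Decidable (Pre_birthday s d m) := by unfold Pre_birthday; infer_instance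
def pvWitness_birthday : List Int × Int × Int := ([1, 2, 1, 3, 2], 3, 2)

def Spec_birthday (s : List Int) (d : Int) (m : Int) (out : Int) : Prop := out = birthday_alt s d m
instance (s : List Int) (d : Int) (m : Int) (out : Int) : Decidable (Spec_birthday s d m out) := by unfold Spec_birthday; infer_instance

-- ===== CLAIM (what is proved, stated in full; the proofs are below) =====
def Claim_equal_birthday : Prop := ∀ (s : List Int) (d : Int) (m : Int), Dom_birthday s d m → Pre_birthday s d m → Spec_birthday s d m (birthday s d m)

-- ===== LEMMAS AND PROOFS =====

-- sum of the length-mn window of s starting at j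
def winSum (s : List Int) (mn j : Nat) : Int := ((s.drop j).take mn).sum

-- counting fold: windows starting at b, b+1, …, b+r-1
def cntFold (s : List Int) (d : Int) (mn b r : Nat) (c : Int) : Int :=
  (List.range r).foldl (fun acc t => if winSum s mn (b + t) = d then acc + 1 else acc) c

lemma cntFold_succ (s : List Int) (d : Int) (mn b r : Nat) (c : Int) :
    cntFold s d mn b (r + 1) c
      = cntFold s d mn (b + 1) r (if winSum s mn b = d then c + 1 else c) := by
  unfold cntFold
  rw [List.range_succ_eq_map, List.foldl_cons, List.foldl_map]
  have hf : (fun (acc : Int) t => if winSum s mn (b + (t + 1)) = d then acc + 1 else acc)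
      = (fun (acc : Int) t => if winSum s mn (b + 1 + t) = d then acc + 1 else acc) := by
    funext acc t
    have h : b + (t + 1) = b + 1 + t := by omega
    rw [h]
  simp [hf]

lemma winSum_step (s : List Int) (mn j : Nat) (hj : j + mn < s.length) :
    winSum s mn j + s.getD (j + mn) 0 - s.getD j 0 = winSum s mn (j + 1) := by
  have hjl : j < s.length := by omega
  have hmn : mn < (s.drop j).length := by simp [List.length_drop]; omega
  have h1 : (s.drop j).take (mn + 1) = (s.drop j).take mn ++ [(s.drop j)[mn]] := by
    rw [List.take_add_one]
    simp [List.getElem?_eq_getElem hmn]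
  have h2 : s.drop j = s[j] :: s.drop (j + 1) := List.drop_eq_getElem_cons hjl
  have hsum1 : ((s.drop j).take (mn + 1)).sum = winSum s mn j + (s.drop j)[mn] := by
    rw [h1]; simp [winSum]
  have hsum2 : ((s.drop j).take (mn + 1)).sum = s[j] + winSum s mn (j + 1) := by
    simp only [winSum]
    rw [h2, List.take_succ_cons, List.sum_cons]
  have hg1 : (s.drop j)[mn] = s[j + mn] := by
    rw [List.getElem_drop]
  have hd1 : s.getD (j + mn) 0 = s[j + mn] := List.getD_eq_getElem s 0 hj
  have hd2 : s.getD j 0 = s[j] := List.getD_eq_getElem s 0 hjl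
  rw [hd1, hd2, ← hg1]
  omega

lemma loopB (s : List Int) (d : Int) (mn : Nat) :
    ∀ (r j : Nat) (c : Int), j + mn + r = s.length →
      ((PySem.List.pyRange ((j + mn : Nat) : Int) ((s.length : Nat) : Int) 1).foldl
          (bStep s d (mn : Int)) (winSum s mn j, c)).2
        = cntFold s d mn (j + 1) r c := by
  intro r
  induction r with
  | zero =>
    intro j c h
    rw [PySem.List.pyRange_one_eq_nil (by exact_mod_cast (by omega : s.length ≤ j + mn))]
    simp [cntFold]
  | succ r ih =>
    intro j c h
    have hlt : ((j + mn : Nat) : Int) < ((s.length : Nat) : Int) := by exact_mod_cast (by omega : j + mn < s.length)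
    rw [PySem.List.pyRange_one_cons hlt, List.foldl_cons]
    have hidx : ((j + mn : Nat) : Int) - (mn : Int) = ((j : Nat) : Int) := by push_cast; ring
    have hstep : bStep s d (mn : Int) (winSum s mn j, c) ((j + mn : Nat) : Int)
        = (winSum s mn (j + 1), if winSum s mn (j + 1) = d then c + 1 else c) := by
      unfold bStep
      rw [hidx]
      simp only [PySem.List.pyGetD_natCast]
      rw [winSum_step s mn j (by omega)]
    rw [hstep]
    have hcast : ((j + mn : Nat) : Int) + 1 = (((j + 1) + mn : Nat) : Int) := by push_cast; ring
    rw [hcast, ih (j + 1) _ (by omega), cntFold_succ]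

lemma aFold (s : List Int) (d : Int) (mn : Nat) (h : mn ≤ s.length) :
    (PySem.List.pyRange 0 (((s.length : Nat) : Int) - (mn : Int) + 1) 1).foldl
        (fun sols i =>
          if (PySem.List.slice s (some i) (some (i + (mn : Int)))).sum = d then sols + 1 else sols) 0
      = cntFold s d mn 0 (s.length - mn + 1) 0 := by
  rw [PySem.List.pyRange_one, List.foldl_map]
  have hN : (((s.length : Nat) : Int) - (mn : Int) + 1 - 0).toNat = s.length - mn + 1 := by omega
  rw [hN]
  unfold cntFold
  have hf : (fun (sols : Int) k =>
        if (PySem.List.slice s (some ((0 : Int) + (k : Nat))) (some ((0 : Int) + (k : Nat) + (mn : Int)))).sum = d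
        then sols + 1 else sols)
      = (fun (acc : Int) t => if winSum s mn (0 + t) = d then acc + 1 else acc) := by
    funext sols k
    rw [zero_add, PySem.List.slice_natCast_add]
    simp [winSum]
  rw [hf]

-- ===== VERDICT (by name: the statement is the Claim_ definition above) =====
theorem birthday_spec : Claim_equal_birthday := by
  intro s d m _ hpre
  unfold Spec_birthday
  obtain ⟨mn, rfl⟩ := Int.eq_ofNat_of_zero_le hpre
  unfold birthday birthday_alt
  simp only [PySem.List.len_eq]
  by_cases hm : (mn : Int) > ((s.length : Nat) : Int)
  · rw [if_pos hm, if_pos hm]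
  · rw [if_neg hm, if_neg hm]
    have hle : mn ≤ s.length := by exact_mod_cast not_lt.mp hm
    have hw0 : (PySem.List.slice s none (some (mn : Int))).sum = winSum s mn 0 := by
      rw [PySem.List.slice_to_natCast]
      simp [winSum]
    rw [aFold s d mn hle, hw0]
    have hloop := loopB s d mn (s.length - mn) 0 (if winSum s mn 0 = d then 1 else 0) (by omega)
    simp only [Nat.zero_add] at hloop
    rw [hloop, cntFold_succ]
    norm_num
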